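-- pv_equiv track=rewrite | github.com/daishuanglu/smartwebtext | utils/video_utils.py | frame_crop_positions
-- ===== SOURCE A (Python) =====
-- def frame_crop_positions(w, h, crop_size):
--     positions = []
--     for x in range(0, w, crop_size[0]):
--         for y in range(0, h, crop_size[1]):
--             xs, xe = x, x+crop_size[0]
--             ys, ye = y, y+crop_size[1]
--             if ye > h:
--                 ys, ye = h - crop_size[1], h
--             if xe > w:
--                 xs, xe = w - crop_size[0], w
--             #cropped_frames = [f[x:, y:y+crop_size[1], :] for f in frames]
--             positions.append((xs, ys))
--     return positions
-- ===== SOURCE B (Python) =====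
-- def frame_crop_positions(w, h, crop_size):
--     cw, ch = crop_size[0], crop_size[1]
--     nx = len(range(0, w, cw))
--     ny = len(range(0, h, ch))
--     return [(min(k // ny * cw, w - cw), min(k % ny * ch, h - ch))
--             for k in range(nx * ny)]
-- ===== Notes on version B (the rewrite author's own statement) =====
-- stated objective: alternative
-- what changed: Replaces the nested x/y loops that clamp both coordinates per cell by a single flat loop over range(nx*ny) whose index is decoded with divmod(k, ny) and clamped with min, after computing the two axis counts once.
-- outside the precondition, e.g. on frame_crop_positions(0, 5, (1, 0)): A returns [], B raises ValueError
import Mathlib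
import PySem

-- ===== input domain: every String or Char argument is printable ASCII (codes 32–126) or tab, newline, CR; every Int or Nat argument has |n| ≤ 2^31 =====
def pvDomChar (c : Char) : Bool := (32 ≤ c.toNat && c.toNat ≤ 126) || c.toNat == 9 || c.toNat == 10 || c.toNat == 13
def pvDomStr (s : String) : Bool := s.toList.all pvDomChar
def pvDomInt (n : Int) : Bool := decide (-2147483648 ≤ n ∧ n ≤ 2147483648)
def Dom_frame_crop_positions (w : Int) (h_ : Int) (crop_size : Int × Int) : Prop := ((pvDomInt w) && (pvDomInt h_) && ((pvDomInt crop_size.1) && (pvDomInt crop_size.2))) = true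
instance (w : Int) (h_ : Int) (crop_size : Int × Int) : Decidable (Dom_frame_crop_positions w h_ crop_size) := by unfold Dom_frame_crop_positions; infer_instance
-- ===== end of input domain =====

-- B replaces A's nested loops by one flat pass over range(nx*ny), decoding each flat index k
-- with divmod(k, ny) and clamping via min (objective: alternative decomposition).


-- ===== PORT A =====
def frame_crop_positions (w : Int) (h_ : Int) (crop_size : Int × Int) : List (Int × Int) :=
  (PySem.List.pyRange 0 w crop_size.1).foldl (fun positions x =>
    (PySem.List.pyRange 0 h_ crop_size.2).foldl (fun positions y =>
      let xs := x
      let xe := x + crop_size.1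
      let ys := y
      let ye := y + crop_size.2
      let yse := if ye > h_ then (h_ - crop_size.2, h_) else (ys, ye)
      let xse := if xe > w then (w - crop_size.1, w) else (xs, xe)
      positions ++ [(xse.1, yse.1)]) positions) []

-- ===== PORT B =====
-- B: one flat pass over range(nx*ny); each flat index k is decoded as (k // ny, k % ny)
-- and clamped with min.  nx = len(range(0, w, cw)), ny = len(range(0, h, ch)).
def frame_crop_positions_alt (w : Int) (h_ : Int) (crop_size : Int × Int) : List (Int × Int) :=
  let cw := crop_size.1
  let ch := crop_size.2
  let nx : Int := (PySem.List.pyRange 0 w cw).length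
  let ny : Int := (PySem.List.pyRange 0 h_ ch).length
  (PySem.List.pyRange 0 (nx * ny) 1).map (fun k =>
    (min (PySem.Int.floordiv k ny * cw) (w - cw),
     min (PySem.Int.mod k ny * ch) (h_ - ch)))

-- ===== PRECONDITION & SPEC =====
-- Pre_ excludes zero steps, on which Python's range raises ValueError; it also excludes the
-- corner where one crop dimension is 0 but the other axis range is empty (A returns [] there
-- because the inner range is never built, while B, which always builds both counts, raises).
def Pre_frame_crop_positions (w : Int) (h_ : Int) (crop_size : Int × Int) : Prop :=
  crop_size.1 ≠ 0 ∧ crop_size.2 ≠ 0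
instance (w : Int) (h_ : Int) (crop_size : Int × Int) : Decidable (Pre_frame_crop_positions w h_ crop_size) := by unfold Pre_frame_crop_positions; infer_instance
def pvWitness_frame_crop_positions : Int × Int × (Int × Int) := (7, 5, (3, 2))
def Spec_frame_crop_positions (w : Int) (h_ : Int) (crop_size : Int × Int) (out : List (Int × Int)) : Prop := out = frame_crop_positions_alt w h_ crop_size
instance (w : Int) (h_ : Int) (crop_size : Int × Int) (out : List (Int × Int)) : Decidable (Spec_frame_crop_positions w h_ crop_size out) := by unfold Spec_frame_crop_positions; infer_instance

-- ===== CLAIM =====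
def Claim_equal_frame_crop_positions : Prop := ∀ (w : Int) (h_ : Int) (crop_size : Int × Int), Dom_frame_crop_positions w h_ crop_size → Pre_frame_crop_positions w h_ crop_size → Spec_frame_crop_positions w h_ crop_size (frame_crop_positions w h_ crop_size)

-- ===== LEMMAS AND PROOFS =====

-- a range with nonzero step, anchored at 0, is its length's worth of multiples of the step
theorem pyRange_zero_step (b s : Int) (hs : s ≠ 0) :
    PySem.List.pyRange 0 b s
      = (List.range (PySem.List.pyRange 0 b s).length).map (fun k : ℕ => s * (k : Int)) := by
  rcases lt_or_gt_of_ne hs with h | h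
  · rw [PySem.List.pyRange_of_neg 0 b h]
    simp only [List.length_map, List.length_range, zero_add]
  · rw [PySem.List.pyRange_of_pos 0 b h]
    simp only [List.length_map, List.length_range, zero_add]

-- flat index loop with divmod decoding = nested loops
theorem range_mul_divmod {α : Type} (n m : ℕ) (f : ℕ → ℕ → α) :
    (List.range (n * m)).map (fun k => f (k / m) (k % m))
      = (List.range n).flatMap (fun i => (List.range m).map (fun j => f i j)) := by
  induction n with
  | zero => simp
  | succ n ih =>
    rw [Nat.succ_mul, List.range_add, List.map_append, ih, List.range_succ,
        List.flatMap_append]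
    congr 1
    simp only [List.flatMap_cons, List.flatMap_nil, List.append_nil, List.map_map]
    apply List.map_congr_left
    intro j hj
    have hjm : j < m := List.mem_range.mp hj
    have hdiv : (n * m + j) / m = n := by
      rw [Nat.add_comm, Nat.mul_comm, Nat.add_mul_div_left _ _ (Nat.zero_lt_of_lt hjm),
          Nat.div_eq_of_lt hjm, Nat.zero_add]
    have hmod : (n * m + j) % m = j := by
      rw [Nat.add_comm, Nat.add_mul_mod_self_right, Nat.mod_eq_of_lt hjm]
    simp [Function.comp, hdiv, hmod]

theorem clamp_eq_min (a c w : Int) :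
    (if a + c ≤ w then a else w - c) = min a (w - c) := by
  rw [min_def]
  by_cases h : a + c ≤ w
  · rw [if_pos h, if_pos (by omega)]
  · rw [if_neg h, if_neg (by omega)]

theorem fcp_eq (w : Int) (h_ : Int) (crop_size : Int × Int)
    (hcw : crop_size.1 ≠ 0) (hch : crop_size.2 ≠ 0) :
    frame_crop_positions w h_ crop_size = frame_crop_positions_alt w h_ crop_size := by
  unfold frame_crop_positions frame_crop_positions_alt
  simp only []
  set cw := crop_size.1 with hcw'
  set ch := crop_size.2 with hch'
  set nxn := (PySem.List.pyRange 0 w cw).length with hnx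
  set nyn := (PySem.List.pyRange 0 h_ ch).length with hny
  -- A-side: nested folds = flatMap of maps of the clamp (stated with min)
  have hinner : ∀ (x : Int) (acc : List (Int × Int)),
      (PySem.List.pyRange 0 h_ ch).foldl (fun positions y =>
        positions ++ [((if x + cw > w then (w - cw, w) else (x, x + cw)).1,
                       (if y + ch > h_ then (h_ - ch, h_) else (y, y + ch)).1)]) acc
      = acc ++ (PySem.List.pyRange 0 h_ ch).map (fun y =>
          (min x (w - cw), min y (h_ - ch))) := by
    intro x acc
    rw [PySem.List.foldl_append_singleton_eq_map]
    congr 1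
    apply List.map_congr_left
    intro y _
    have hx' : (if x + cw > w then (w - cw, w) else (x, x + cw)).1
        = if x + cw ≤ w then x else w - cw := by
      by_cases hx : x + cw ≤ w
      · rw [if_neg (by omega), if_pos hx]
      · rw [if_pos (by omega), if_neg hx]
    have hy' : (if y + ch > h_ then (h_ - ch, h_) else (y, y + ch)).1
        = if y + ch ≤ h_ then y else h_ - ch := by
      by_cases hy : y + ch ≤ h_
      · rw [if_neg (by omega), if_pos hy]
      · rw [if_pos (by omega), if_neg hy]
    rw [hx', hy', clamp_eq_min, clamp_eq_min]
  have hA : (PySem.List.pyRange 0 w cw).foldl (fun positions x =>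
        (PySem.List.pyRange 0 h_ ch).foldl (fun positions y =>
          positions ++ [((if x + cw > w then (w - cw, w) else (x, x + cw)).1,
                         (if y + ch > h_ then (h_ - ch, h_) else (y, y + ch)).1)]) positions) []
      = (PySem.List.pyRange 0 w cw).flatMap (fun x =>
          (PySem.List.pyRange 0 h_ ch).map (fun y => (min x (w - cw), min y (h_ - ch)))) := by
    rw [show (fun (positions : List (Int × Int)) (x : Int) =>
        (PySem.List.pyRange 0 h_ ch).foldl (fun positions y =>
          positions ++ [((if x + cw > w then (w - cw, w) else (x, x + cw)).1,
                         (if y + ch > h_ then (h_ - ch, h_) else (y, y + ch)).1)]) positions)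
      = (fun positions x => positions ++ (PySem.List.pyRange 0 h_ ch).map (fun y =>
          (min x (w - cw), min y (h_ - ch)))) from funext fun acc => funext fun x => hinner x acc]
    rw [PySem.List.foldl_append_eq_flatMap]
    simp
  rw [hA]
  -- B-side: flat range, divmod-decoded, as a map over List.range
  have hcast : ((nxn : Int) * (nyn : Int) - 0).toNat = nxn * nyn := by
    rw [sub_zero, ← Nat.cast_mul, Int.toNat_natCast]
  have hB : (PySem.List.pyRange 0 ((nxn : Int) * (nyn : Int)) 1).map (fun k =>
        (min (PySem.Int.floordiv k (nyn : Int) * cw) (w - cw),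
         min (PySem.Int.mod k (nyn : Int) * ch) (h_ - ch)))
      = (List.range (nxn * nyn)).map (fun k : ℕ =>
          (fun i j : ℕ => (min ((i : Int) * cw) (w - cw), min ((j : Int) * ch) (h_ - ch)))
            (k / nyn) (k % nyn)) := by
    rw [PySem.List.pyRange_one, hcast, List.map_map]
    apply List.map_congr_left
    intro k _
    simp only [Function.comp, zero_add, PySem.Int.floordiv_natCast, PySem.Int.mod_natCast]
  rw [hB, range_mul_divmod nxn nyn
    (fun i j : ℕ => (min ((i : Int) * cw) (w - cw), min ((j : Int) * ch) (h_ - ch)))]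
  -- A-side ranges as multiples of the step, then pointwise agreement
  rw [pyRange_zero_step w cw hcw, pyRange_zero_step h_ ch hch, ← hnx, ← hny,
      List.flatMap_map]
  apply List.flatMap_congr
  intro i _
  rw [List.map_map]
  apply List.map_congr_left
  intro j _
  simp [Function.comp, mul_comm]

-- ===== VERDICT =====
theorem frame_crop_positions_spec : Claim_equal_frame_crop_positions := by
  intro w h_ crop_size _ hpre
  unfold Spec_frame_crop_positions
  exact fcp_eq w h_ crop_size hpre.1 hpre.2
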